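-- pv_equiv track=rewrite | github.com/ddukbaek2/DDUKSystems | TableExporter/TableExporter.py | IsCorrectName
-- ===== SOURCE A (Python) =====
-- def IsCorrectName(value : str):
-- 	if not value:
-- 		return False
--
-- 	# 알파벳 ==> 숫자의 순으로 호출되어야하며 알파벳과 숫자 외의 문자열은 실패.
-- 	is_correct = False
-- 	for val in value:
-- 		if val.isalpha():
-- 			is_correct = True
-- 		elif val.isnumeric():
-- 			if not is_correct:
-- 				return False
-- 		elif val == "_":
-- 			is_correct = True
-- 		else:
-- 			return False
-- 	return True
-- ===== SOURCE B (Python) =====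
-- def IsCorrectName(value : str):
--     # B: the loop's flag only flips False->True at a letter/underscore and never
--     # resets, so the only digit that can fail is one before any letter/underscore,
--     # i.e. the first character. Two direct checks replace the stateful loop.
--     if not value:
--         return False
--     if not (value[0].isalpha() or value[0] == "_"):
--         return False
--     return all(c.isalpha() or c.isnumeric() or c == "_" for c in value)
-- ===== Notes on version B (the rewrite author's own statement) =====
-- stated objective: simpler
-- what changed: Replaced the stateful flag loop (flag set by letters/underscores, checked at digits) with two stateless checks: the first character must be a letter/underscore and every character must be letter/digit/underscore.
import Mathlib
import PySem

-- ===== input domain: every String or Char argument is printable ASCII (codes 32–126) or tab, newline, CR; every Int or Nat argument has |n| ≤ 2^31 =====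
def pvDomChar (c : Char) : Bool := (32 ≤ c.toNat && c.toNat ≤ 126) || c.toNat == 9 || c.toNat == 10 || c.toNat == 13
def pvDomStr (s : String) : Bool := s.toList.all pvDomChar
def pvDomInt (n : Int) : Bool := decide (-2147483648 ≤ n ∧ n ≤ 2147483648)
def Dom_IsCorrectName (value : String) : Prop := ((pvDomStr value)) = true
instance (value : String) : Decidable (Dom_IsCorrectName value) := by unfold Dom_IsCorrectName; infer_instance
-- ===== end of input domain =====

-- B replaces A's stateful flag loop with two stateless checks (first char, all chars); equal return value on every input.
-- (Python isnumeric coincides with isdigit on the ASCII domain; ported as PySem.Chars.isdigit.)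

-- ===== PORT A =====
-- the for-loop over the characters with the is_correct flag, branch order as in A
def IsCorrectNameLoop : List Char → Bool → Bool
  | [], _ => true
  | c :: cs, isCorrect =>
    if PySem.Chars.isalpha c then IsCorrectNameLoop cs true
    else if PySem.Chars.isdigit c then
      (if !isCorrect then false else IsCorrectNameLoop cs isCorrect)
    else if c == '_' then IsCorrectNameLoop cs true
    else false

def IsCorrectName (value : String) : Bool :=
  if value == "" then false
  else IsCorrectNameLoop value.toList false

-- ===== PORT B =====
def IsCorrectName_alt (value : String) : Bool :=
  match value.toList with
  | [] => false
  | c :: _ =>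
    if !(PySem.Chars.isalpha c || c == '_') then false
    else value.toList.all (fun d => PySem.Chars.isalpha d || PySem.Chars.isdigit d || d == '_')

-- ===== PRECONDITION & SPEC =====
def Spec_IsCorrectName (value : String) (out : Bool) : Prop := out = IsCorrectName_alt value
instance (value : String) (out : Bool) : Decidable (Spec_IsCorrectName value out) := by unfold Spec_IsCorrectName; infer_instance

-- ===== CLAIM (what is proved, stated in full; the proofs are below) =====
def Claim_equal_IsCorrectName : Prop := ∀ (value : String), Dom_IsCorrectName value → Spec_IsCorrectName value (IsCorrectName value)

-- ===== LEMMAS AND PROOFS =====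

-- with the flag already set, the loop is exactly the all-characters check
theorem loop_true_eq_all (cs : List Char) :
    IsCorrectNameLoop cs true =
      cs.all (fun d => PySem.Chars.isalpha d || PySem.Chars.isdigit d || d == '_') := by
  induction cs with
  | nil => rfl
  | cons c cs ih =>
    simp only [IsCorrectNameLoop, List.all_cons]
    by_cases h1 : PySem.Chars.isalpha c <;> by_cases h2 : PySem.Chars.isdigit c <;>
      by_cases h3 : c == '_' <;> simp [h1, h2, h3, ih]

theorem IsCorrectName_spec : Claim_equal_IsCorrectName := by
  intro value _
  unfold Spec_IsCorrectName IsCorrectName IsCorrectName_alt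
  rcases hl : value.toList with _ | ⟨c, cs⟩
  · have hv : value = "" := by
      have := congrArg List.length hl
      simp at this
      exact this
    simp [hv]
  · have hne : value ≠ "" := by
      intro h; rw [h] at hl; simp at hl
    simp only [beq_iff_eq, hne]
    show IsCorrectNameLoop (c :: cs) false = _
    simp only [IsCorrectNameLoop]
    by_cases h1 : PySem.Chars.isalpha c <;> by_cases h2 : PySem.Chars.isdigit c <;>
      by_cases h3 : c == '_'
    all_goals
      first
      | (simp [h1, h2, h3, loop_true_eq_all, List.all_cons]; done)
      | (have hc : c = '_' := by simpa using h3
         subst hc; simp [PySem.Chars.isdigit] at h2)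

-- ===== VERDICT (by name: the statement is the Claim_ definition above) =====
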